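-- pv_equiv track=rewrite | github.com/Anne117/kuznechik | kyznechik.py | summ
-- ===== SOURCE A (Python) =====
-- def summ(x,y,p):
--     if len(x) >= len(y):
--         maxma = x
--         minma = y
--     else:
--         maxma = y
--         minma = x
--     ans = [0] * len(maxma)
--     for i in range(1,1+len(minma)):
--         ans[-i] = (maxma[-i]+minma[-i]) % p
--     for i in range(1+len(minma),1+len(maxma)):
--         ans[-i] = maxma[-i] % p
--     return ans
-- ===== SOURCE B (Python) =====
-- def summ(x, y, p):
--     n = max(len(x), len(y))
--     xp = [0] * (n - len(x)) + x
--     yp = [0] * (n - len(y)) + y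
--     return [(a + b) % p for a, b in zip(xp, yp)]
-- ===== Notes on version B (the rewrite author's own statement) =====
-- stated objective: simpler
-- what changed: B left-pads the shorter list with zeros to equal length and computes (a+b)%p in one uniform zipped comprehension, replacing A's preallocated result array mutated by two separate negative-index loops (overlap loop and prefix loop).
import Mathlib
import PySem

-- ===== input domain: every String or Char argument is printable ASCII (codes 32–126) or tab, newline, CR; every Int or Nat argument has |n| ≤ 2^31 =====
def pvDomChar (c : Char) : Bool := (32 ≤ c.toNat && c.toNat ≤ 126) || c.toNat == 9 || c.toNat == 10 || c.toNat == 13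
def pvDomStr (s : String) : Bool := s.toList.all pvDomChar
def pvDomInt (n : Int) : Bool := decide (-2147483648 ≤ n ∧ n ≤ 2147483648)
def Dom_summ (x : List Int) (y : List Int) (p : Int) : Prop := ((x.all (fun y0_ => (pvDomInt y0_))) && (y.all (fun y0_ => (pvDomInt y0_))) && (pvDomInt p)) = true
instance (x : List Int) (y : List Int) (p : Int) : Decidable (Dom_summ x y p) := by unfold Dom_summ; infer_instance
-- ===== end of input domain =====

-- B left-pads the shorter list with zeros and computes (a+b) % p in one uniform zipped pass,
-- instead of A's preallocated array mutated by two distinct negative-index loops; objective: simpler.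

-- ===== PORT A =====
def summ (x : List Int) (y : List Int) (p : Int) : List Int :=
  let mm : List Int × List Int := if x.length ≥ y.length then (x, y) else (y, x)
  let maxma := mm.1
  let minma := mm.2
  let ans : List Int := List.replicate maxma.length 0
  let ans := (PySem.List.pyRange 1 (1 + minma.length) 1).foldl
    (fun a i => PySem.List.pySetD a (-i)
      (PySem.Int.mod (PySem.List.pyGetD maxma (-i) 0 + PySem.List.pyGetD minma (-i) 0) p)) ans
  let ans := (PySem.List.pyRange (1 + minma.length) (1 + maxma.length) 1).foldl
    (fun a i => PySem.List.pySetD a (-i)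
      (PySem.Int.mod (PySem.List.pyGetD maxma (-i) 0) p)) ans
  ans

-- ===== PORT B =====
def summ_alt (x : List Int) (y : List Int) (p : Int) : List Int :=
  let n := max x.length y.length
  let xp := List.replicate (n - x.length) (0 : Int) ++ x
  let yp := List.replicate (n - y.length) (0 : Int) ++ y
  (xp.zip yp).map (fun ab => PySem.Int.mod (ab.1 + ab.2) p)

-- ===== PRECONDITION & SPEC =====
-- Pre_ excludes p = 0 when the longer list is nonempty: there Python A raises ZeroDivisionError (and B raises too).
def Pre_summ (x : List Int) (y : List Int) (p : Int) : Prop := p ≠ 0 ∨ (x = [] ∧ y = [])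
instance (x : List Int) (y : List Int) (p : Int) : Decidable (Pre_summ x y p) := by unfold Pre_summ; infer_instance
def pvWitness_summ : List Int × List Int × Int := ([1, 2, 3], [4, 5], 7)

def Spec_summ (x : List Int) (y : List Int) (p : Int) (out : List Int) : Prop := out = summ_alt x y p
instance (x : List Int) (y : List Int) (p : Int) (out : List Int) : Decidable (Spec_summ x y p out) := by unfold Spec_summ; infer_instance

-- ===== CLAIM (what is proved, stated in full; the proofs are below) =====
def Claim_equal_summ : Prop := ∀ (x : List Int) (y : List Int) (p : Int), Dom_summ x y p → Pre_summ x y p → Spec_summ x y p (summ x y p)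

-- ===== LEMMAS AND PROOFS =====

theorem pySetD_neg_int (a : List Int) (lo : Int) (v : Int) (h1 : 1 ≤ lo) (h2 : lo ≤ a.length) :
    PySem.List.pySetD a (-lo) v = a.set (a.length - lo.toNat) v := by
  unfold PySem.List.pySetD PySem.List.pySet? PySem.List.pyIdx?
  split_ifs <;> simp_all <;> omega

theorem pyGetD_neg_int (a : List Int) (lo : Int) (d : Int) (h1 : 1 ≤ lo) (h2 : lo ≤ a.length) :
    PySem.List.pyGetD a (-lo) d = a.getD (a.length - lo.toNat) d := by
  unfold PySem.List.pyGetD PySem.List.pyGet? PySem.List.pyIdx?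
  split_ifs <;> simp_all <;> omega

-- Folding pySetD at positions -i for i ∈ [lo, lo+k) writes w i at index (length - i), leaves the rest.
theorem foldSet_getElem? (w : Int → Int) :
    ∀ (k : ℕ) (lo : Int) (a : List Int), 1 ≤ lo → lo + k ≤ (a.length : Int) + 1 →
    ∀ j : ℕ, j < a.length →
    ((PySem.List.pyRange lo (lo + k) 1).foldl
        (fun b i => PySem.List.pySetD b (-i) (w i)) a)[j]? =
      if lo ≤ (a.length : Int) - j ∧ (a.length : Int) - j < lo + k
      then some (w ((a.length : Int) - j)) else a[j]? := by
  intro k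
  induction k with
  | zero =>
    intro lo a h1 h2 j hj
    rw [show lo + ((0:ℕ):Int) = lo by simp, PySem.List.pyRange_one_eq_nil (by omega)]
    simp only [List.foldl_nil]
    rw [if_neg (by omega)]
  | succ k ih =>
    intro lo a h1 h2 j hj
    rw [PySem.List.pyRange_one_cons (by push_cast at h2 ⊢; omega)]
    simp only [List.foldl_cons]
    have hset : PySem.List.pySetD a (-lo) (w lo) = a.set (a.length - lo.toNat) (w lo) :=
      pySetD_neg_int a lo (w lo) h1 (by push_cast at h2 ⊢; omega)
    have hlen : (PySem.List.pySetD a (-lo) (w lo)).length = a.length :=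
      PySem.List.length_pySetD a (-lo) (w lo)
    have hrange : lo + ((k + 1 : ℕ) : Int) = (lo + 1) + (k : ℕ) := by push_cast; ring
    rw [hrange, ih (lo + 1) _ (by omega) (by rw [hlen]; push_cast at h2 ⊢; omega) j (by rw [hlen]; omega)]
    rw [hlen, hset]
    by_cases hmid : lo + 1 ≤ (a.length : Int) - j ∧ (a.length : Int) - j < lo + 1 + (k : ℕ)
    · rw [if_pos hmid, if_pos (by omega)]
    · rw [if_neg hmid]
      by_cases hj0 : lo ≤ (a.length : Int) - j ∧ (a.length : Int) - j < lo + 1 + (k : ℕ)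
      · rw [if_pos hj0]
        have hlo : (a.length : Int) - j = lo := by omega
        rw [hlo]
        have hjeq : j = a.length - lo.toNat := by omega
        rw [hjeq]
        exact List.getElem?_set_self (by omega)
      · rw [if_neg hj0]
        exact List.getElem?_set_ne (by omega)

theorem foldSet_getElem?' (w : Int → Int) (k : ℕ) (lo : Int) (a : List Int) (n : ℕ)
    (hn : a.length = n) (h1 : 1 ≤ lo) (h2 : lo + k ≤ (n : Int) + 1) (j : ℕ) (hj : j < n) :
    ((PySem.List.pyRange lo (lo + k) 1).foldl
        (fun b i => PySem.List.pySetD b (-i) (w i)) a)[j]? =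
      if lo ≤ (n : Int) - j ∧ (n : Int) - j < lo + k
      then some (w ((n : Int) - j)) else a[j]? := by
  subst hn
  exact foldSet_getElem? w k lo a h1 h2 j hj

-- the body of A after the max/min choice, for proofs only
def coreA (X Y : List Int) (p : Int) : List Int :=
  let a0 : List Int := List.replicate X.length 0
  let a1 := (PySem.List.pyRange 1 (1 + Y.length) 1).foldl
    (fun a i => PySem.List.pySetD a (-i)
      (PySem.Int.mod (PySem.List.pyGetD X (-i) 0 + PySem.List.pyGetD Y (-i) 0) p)) a0
  (PySem.List.pyRange (1 + Y.length) (1 + X.length) 1).foldl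
    (fun a i => PySem.List.pySetD a (-i)
      (PySem.Int.mod (PySem.List.pyGetD X (-i) 0) p)) a1

theorem summ_eq_coreA (x y : List Int) (p : Int) :
    summ x y p = if x.length ≥ y.length then coreA x y p else coreA y x p := by
  unfold summ coreA
  split <;> rfl

theorem length_foldl_pySetD (L : List Int) (f : Int → Int) :
    ∀ a0 : List Int, (L.foldl (fun a i => PySem.List.pySetD a (-i) (f i)) a0).length = a0.length := by
  induction L with
  | nil => intro a0; rfl
  | cons h t iht => intro a0; simp only [List.foldl_cons, iht, PySem.List.length_pySetD]

theorem coreA_length (X Y : List Int) (p : Int) : (coreA X Y p).length = X.length := by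
  unfold coreA
  simp only [length_foldl_pySetD, List.length_replicate]

theorem coreA_getElem? (X Y : List Int) (p : Int) (h : Y.length ≤ X.length)
    (j : ℕ) (hj : j < X.length) :
    (coreA X Y p)[j]? =
      some (if j < X.length - Y.length
            then PySem.Int.mod (X.getD j 0) p
            else PySem.Int.mod (X.getD j 0 + Y.getD (j - (X.length - Y.length)) 0) p) := by
  unfold coreA
  simp only
  have hl1 : ((PySem.List.pyRange 1 (1 + (Y.length : Int)) 1).foldl
      (fun a i => PySem.List.pySetD a (-i)
        (PySem.Int.mod (PySem.List.pyGetD X (-i) 0 + PySem.List.pyGetD Y (-i) 0) p))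
      (List.replicate X.length 0)).length = X.length := by
    simp only [length_foldl_pySetD, List.length_replicate]
  rw [show (1 + (X.length : Int)) = (1 + (Y.length : Int)) + ((X.length - Y.length : ℕ) : Int) by
        omega]
  rw [foldSet_getElem?' _ (X.length - Y.length) (1 + (Y.length : Int)) _ X.length hl1
        (by omega) (by omega) j hj]
  by_cases hcase : j < X.length - Y.length
  · rw [if_pos (by omega), if_pos hcase]
    rw [pyGetD_neg_int X ((X.length : Int) - j) 0 (by omega) (by omega)]
    rw [show X.length - ((X.length : Int) - (j:ℕ)).toNat = j by omega]
  · rw [if_neg (by omega)]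
    rw [foldSet_getElem?' _ Y.length 1 _ X.length (List.length_replicate)
          (by omega) (by omega) j hj]
    rw [if_pos (by omega), if_neg hcase]
    rw [pyGetD_neg_int X ((X.length : Int) - j) 0 (by omega) (by omega)]
    rw [pyGetD_neg_int Y ((X.length : Int) - j) 0 (by omega) (by omega)]
    rw [show X.length - ((X.length : Int) - (j:ℕ)).toNat = j by omega]
    rw [show Y.length - ((X.length : Int) - (j:ℕ)).toNat = j - (X.length - Y.length) by omega]

theorem summ_alt_length (x y : List Int) (p : Int) :
    (summ_alt x y p).length = max x.length y.length := by
  unfold summ_alt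
  simp only [List.length_map, List.length_zip, List.length_append, List.length_replicate]
  omega

theorem pad_getElem (z : List Int) (n j : ℕ) (hzn : z.length ≤ n) (hj : j < n) :
    (List.replicate (n - z.length) (0 : Int) ++ z)[j]'(by
        simp only [List.length_append, List.length_replicate]; omega) =
      if j < n - z.length then 0 else z.getD (j - (n - z.length)) 0 := by
  by_cases hc : j < n - z.length
  · rw [if_pos hc, List.getElem_append_left (by simpa using hc)]
    exact List.getElem_replicate _
  · rw [if_neg hc, List.getElem_append_right (by simpa using hc)]
    simp only [List.length_replicate]
    rw [List.getD_eq_getElem _ _ (by omega)]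

theorem summ_alt_getElem? (x y : List Int) (p : Int) (j : ℕ)
    (hj : j < max x.length y.length) :
    (summ_alt x y p)[j]? =
      some (PySem.Int.mod
        ((if j < max x.length y.length - x.length then 0
          else x.getD (j - (max x.length y.length - x.length)) 0) +
         (if j < max x.length y.length - y.length then 0
          else y.getD (j - (max x.length y.length - y.length)) 0)) p) := by
  unfold summ_alt
  simp only
  rw [List.getElem?_eq_getElem (by
      simp only [List.length_map, List.length_zip, List.length_append, List.length_replicate]
      omega)]
  rw [List.getElem_map, List.getElem_zip]
  rw [pad_getElem x (max x.length y.length) j (le_max_left _ _) hj]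
  rw [pad_getElem y (max x.length y.length) j (le_max_right _ _) hj]

-- ===== VERDICT (by name: the statement is the Claim_ definition above) =====
theorem summ_spec : Claim_equal_summ := by
  unfold Claim_equal_summ Spec_summ
  intro x y p _ _
  apply List.ext_getElem?_iff.mpr
  intro j
  by_cases hj : j < max x.length y.length
  · rw [summ_alt_getElem? x y p j hj, summ_eq_coreA]
    by_cases hxy : x.length ≥ y.length
    · rw [if_pos hxy, coreA_getElem? x y p hxy j (by omega)]
      have hn : max x.length y.length = x.length := by omega
      rw [hn] at *
      by_cases hc : j < x.length - y.length
      · rw [if_pos hc, if_neg (by omega), if_pos (by omega), add_zero]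
        rw [show x.length - x.length = 0 by omega, Nat.sub_zero]
      · rw [if_neg hc, if_neg (by omega), if_neg (by omega)]
        rw [show x.length - x.length = 0 by omega, Nat.sub_zero]
    · rw [if_neg hxy, coreA_getElem? y x p (by omega) j (by omega)]
      have hn : max x.length y.length = y.length := by omega
      rw [hn] at *
      by_cases hc : j < y.length - x.length
      · rw [if_pos hc, if_pos (by omega), if_neg (by omega), zero_add]
        rw [show y.length - y.length = 0 by omega, Nat.sub_zero]
      · rw [if_neg hc, if_neg (by omega), if_neg (by omega)]
        rw [show y.length - y.length = 0 by omega, Nat.sub_zero, add_comm]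
  · rw [List.getElem?_eq_none_iff.mpr
        (by rw [summ_eq_coreA]; split <;> rw [coreA_length] <;> omega)]
    rw [List.getElem?_eq_none_iff.mpr (by rw [summ_alt_length]; omega)]
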